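-- pv_equiv track=rewrite | github.com/tababio/taba | TABA_dist/winCorrelacao.py | formataTextoCaixa
-- ===== SOURCE A (Python) =====
-- def formataTextoCaixa(list):
--
--     totalColunas = list.index("Predicted", )
--     col = 0 #
--     texto = ''
--     for lin in list:
--         if col > totalColunas:
--             texto = texto+lin+"\n"
--             col = 0
--         else:
--             texto = texto+lin+","
--             col = col+1
--     return texto
-- ===== SOURCE B (Python) =====
-- def formataTextoCaixa(list):
--     chunk = list.index("Predicted") + 2
--     rows = []
--     i = 0
--     while i < len(list):
--         row = list[i:i + chunk]
--         if len(row) == chunk: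
--             rows.append(','.join(row) + '\n')
--         else:
--             rows.append(','.join(row) + ',')
--         i += chunk
--     return ''.join(rows)
-- ===== Notes on version B (the rewrite author's own statement) =====
-- stated objective: simpler
-- what changed: B slices the list into consecutive rows of length index('Predicted')+2 and joins each slice with commas (newline after a complete row, trailing comma after a partial one), instead of A's flat loop threading a column counter and growing one string element by element.
import Mathlib
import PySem

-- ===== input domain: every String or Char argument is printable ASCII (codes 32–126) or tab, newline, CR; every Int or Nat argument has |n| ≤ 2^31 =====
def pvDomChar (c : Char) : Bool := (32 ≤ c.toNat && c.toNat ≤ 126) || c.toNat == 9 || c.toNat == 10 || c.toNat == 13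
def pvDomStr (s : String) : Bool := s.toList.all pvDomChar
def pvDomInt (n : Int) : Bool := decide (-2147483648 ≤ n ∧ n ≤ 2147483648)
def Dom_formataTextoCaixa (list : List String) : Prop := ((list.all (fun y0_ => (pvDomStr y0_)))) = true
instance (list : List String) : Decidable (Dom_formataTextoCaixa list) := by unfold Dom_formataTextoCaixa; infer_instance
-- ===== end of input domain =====

-- B formats the list by slicing it into rows of length index("Predicted")+2 and joining each slice
-- (objective: simpler decomposition, same cost); A threads a column counter through one flat loop.

-- ===== PORT A =====
-- the 'for lin in list' loop of A, carrying the state (col, texto)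
def pvLoopA (T : Nat) : List String → Nat → String → String
  | [], _, texto => texto
  | lin :: rest, col, texto =>
    if col > T then pvLoopA T rest 0 (texto ++ lin ++ "\n")
    else pvLoopA T rest (col + 1) (texto ++ lin ++ ",")

def formataTextoCaixa (list : List String) : String :=
  match PySem.List.index? list "Predicted" with
  | none => ""          -- Python raises ValueError here; excluded by Pre_
  | some totalColunas => pvLoopA totalColunas list 0 ""

-- ===== PORT B =====
-- the 'while i < len(list)' loop of B: each iteration takes the slice list[i:i+chunk]
-- (here: the first chunk = T+2 elements of the rest) and emits one row string
def pvRowsB (T : Nat) : List String → String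
  | [] => ""
  | x :: xs =>
    let row := (x :: xs).take (T + 2)
    if row.length = T + 2 then
      PySem.Str.join "," row ++ "\n" ++ pvRowsB T ((x :: xs).drop (T + 2))
    else
      PySem.Str.join "," row ++ ","
termination_by l => l.length
decreasing_by simp

def formataTextoCaixa_alt (list : List String) : String :=
  match PySem.List.index? list "Predicted" with
  | none => ""          -- Python raises ValueError here; excluded by Pre_
  | some idx => pvRowsB idx list

-- ===== PRECONDITION & SPEC =====
-- Pre_ excludes exactly the inputs without "Predicted", where both Pythons raise ValueError.
def Pre_formataTextoCaixa (list : List String) : Prop := "Predicted" ∈ list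
instance (list : List String) : Decidable (Pre_formataTextoCaixa list) := by unfold Pre_formataTextoCaixa; infer_instance
def pvWitness_formataTextoCaixa : List String := (["a", "Predicted", "b", "c", "d"])
def Spec_formataTextoCaixa (list : List String) (out : String) : Prop := out = formataTextoCaixa_alt list
instance (list : List String) (out : String) : Decidable (Spec_formataTextoCaixa list out) := by unfold Spec_formataTextoCaixa; infer_instance

-- ===== CLAIM (what is proved, stated in full; the proofs are below) =====
def Claim_equal_formataTextoCaixa : Prop := ∀ (list : List String), Dom_formataTextoCaixa list → Pre_formataTextoCaixa list → Spec_formataTextoCaixa list (formataTextoCaixa list)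

-- ===== LEMMAS AND PROOFS =====

-- join helpers at the String level
theorem pv_join_nil : PySem.Str.join "," ([] : List String) = "" := by
  apply String.toList_inj.mp
  simp [PySem.Str.toList_join, PySem.Chars.join_nil]

theorem pv_join_one (x : String) : PySem.Str.join "," [x] = x := by
  apply String.toList_inj.mp
  simp [PySem.Str.toList_join, PySem.Chars.join_singleton]

theorem pv_join_cons (x : String) (t : List String) (ht : t ≠ []) :
    PySem.Str.join "," (x :: t) = x ++ "," ++ PySem.Str.join "," t := by
  apply String.toList_inj.mp
  cases t with
  | nil => exact absurd rfl ht
  | cons y r => simp [PySem.Str.toList_join, PySem.Chars.join_cons_cons]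

-- elementwise companion of A's loop, without the accumulator
def pvAux (T : Nat) : List String → Nat → String
  | [], _ => ""
  | x :: xs, col =>
    if col > T then x ++ "\n" ++ pvAux T xs 0
    else x ++ "," ++ pvAux T xs (col + 1)

theorem pvLoopA_eq_aux (T : Nat) (xs : List String) :
    ∀ (col : Nat) (texto : String), pvLoopA T xs col texto = texto ++ pvAux T xs col := by
  induction xs with
  | nil => intro col texto; simp [pvLoopA, pvAux]
  | cons x rest ih =>
    intro col texto
    by_cases h : col > T
    · simp [pvLoopA, pvAux, h, ih]
      apply String.toList_inj.mp
      simp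
    · simp [pvLoopA, pvAux, h, ih]
      apply String.toList_inj.mp
      simp

-- peeling one row off pvAux: with k comma slots left before the newline slot
theorem pvAux_peel (T : Nat) :
    ∀ (xs : List String) (k col : Nat), col + k = T + 1 →
      pvAux T xs col =
        (if xs.length ≤ k then
            PySem.Str.join "," xs ++ (if xs.isEmpty then "" else ",")
         else
            PySem.Str.join "," (xs.take (k + 1)) ++ "\n" ++ pvAux T (xs.drop (k + 1)) 0) := by
  intro xs
  induction xs with
  | nil =>
    intro k col _
    simp [pvAux, pv_join_nil]
  | cons x t ih =>
    intro k col hk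
    cases k with
    | zero =>
      have hc : col > T := by omega
      simp only [pvAux, if_pos hc]
      have hlen : ¬ ((x :: t).length ≤ 0) := by simp
      rw [if_neg hlen]
      simp [pv_join_one]
    | succ k' =>
      have hc : ¬ (col > T) := by omega
      simp only [pvAux, if_neg hc]
      rw [ih k' (col + 1) (by omega)]
      by_cases hlen : t.length ≤ k'
      · have hlen2 : (x :: t).length ≤ k' + 1 := by simp; omega
        rw [if_pos hlen, if_pos hlen2]
        cases t with
        | nil =>
          simp [pv_join_one, pv_join_nil]
        | cons y r =>
          rw [pv_join_cons x (y :: r) (by simp)]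
          simp only [List.isEmpty_cons]
          apply String.toList_inj.mp
          simp
      · have hlen2 : ¬ ((x :: t).length ≤ k' + 1) := by simp; omega
        rw [if_neg hlen, if_neg hlen2]
        have htake : (x :: t).take (k' + 1 + 1) = x :: t.take (k' + 1) := by simp
        have hdrop : (x :: t).drop (k' + 1 + 1) = t.drop (k' + 1) := by simp
        rw [htake, hdrop]
        rw [pv_join_cons x (t.take (k' + 1)) (by
          have hne : t ≠ [] := by
            intro h0; rw [h0] at hlen; simp at hlen
          simp [List.take_eq_nil_iff, hne])]
        apply String.toList_inj.mp
        simp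

-- one unfolding step of pvRowsB on a nonempty list
theorem pvRowsB_cons (T : Nat) (x : String) (t : List String) :
    pvRowsB T (x :: t) =
      (if ((x :: t).take (T + 2)).length = T + 2 then
        PySem.Str.join "," ((x :: t).take (T + 2)) ++ "\n" ++ pvRowsB T ((x :: t).drop (T + 2))
      else PySem.Str.join "," ((x :: t).take (T + 2)) ++ ",") := by
  rw [pvRowsB]

-- the two row builders agree (strong induction on length)
theorem pvAux_eq_rowsB (T : Nat) :
    ∀ (n : Nat) (xs : List String), xs.length ≤ n → pvAux T xs 0 = pvRowsB T xs := by
  intro n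
  induction n with
  | zero =>
    intro xs hx
    have : xs = [] := List.eq_nil_of_length_eq_zero (by omega)
    subst this; simp [pvAux, pvRowsB]
  | succ n ih =>
    intro xs hx
    cases xs with
    | nil => simp [pvAux, pvRowsB]
    | cons x t =>
      rw [pvAux_peel T (x :: t) (T + 1) 0 (by omega)]
      by_cases hlen : (x :: t).length ≤ T + 1
      · rw [if_pos hlen]
        have h2 : t.length ≤ T := by simp at hlen; omega
        have hneg : ¬ (((x :: t).take (T + 2)).length = T + 2) := by
          simp only [List.length_take, List.length_cons]; omega
        have htk : (x :: t).length ≤ T + 2 := by simp only [List.length_cons]; omega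
        rw [pvRowsB_cons, if_neg hneg, List.take_of_length_le htk]
        simp [List.isEmpty_cons]
      · rw [if_neg hlen]
        have hrl : ((x :: t).take (T + 2)).length = T + 2 := by
          simp at hlen ⊢; omega
        rw [pvRowsB_cons, if_pos hrl,
            ih ((x :: t).drop (T + 1 + 1)) (by simp at hlen hx ⊢; omega)]

-- ===== VERDICT (by name: the statement is the Claim_ definition above) =====
theorem formataTextoCaixa_spec : Claim_equal_formataTextoCaixa := by
  intro list _ hpre
  unfold Spec_formataTextoCaixa formataTextoCaixa formataTextoCaixa_alt
  cases hT : PySem.List.index? list "Predicted" with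
  | none => exact absurd hpre ((PySem.List.index?_eq_none_iff list "Predicted").mp hT)
  | some T =>
    show pvLoopA T list 0 "" = pvRowsB T list
    rw [pvLoopA_eq_aux, pvAux_eq_rowsB T list.length list (le_refl _)]
    apply String.toList_inj.mp
    simp
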